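-- pv_equiv track=rewrite | github.com/Sonu-Shettiyar/python-basics | set 2/index.py | add_lists
-- ===== SOURCE A (Python) =====
-- def add_lists(list1, list2):
--     new_list = []
--     min_len = min(len(list1), len(list2))
--     for i in range(min_len):
--         new_list.append(list1[i] + list2[i])
--     if len(list1) > len(list2):
--         new_list.extend(list1[min_len:])
--     else:
--         new_list.extend(list2[min_len:])
--
--     return new_list
-- ===== SOURCE B (Python) =====
-- def add_lists(list1, list2):
--     return [(list1[i] if i < len(list1) else 0) + (list2[i] if i < len(list2) else 0)
--             for i in range(max(len(list1), len(list2)))]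
-- ===== Notes on version B (the rewrite author's own statement) =====
-- stated objective: alternative
-- what changed: A computes the overlap sums then appends the longer list's tail slice in a second phase; B has no overlap/tail split at all: one uniform comprehension over range(max(len1,len2)) that zero-pads the shorter list, relying on 0 being the additive identity for ints.
import Mathlib
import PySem

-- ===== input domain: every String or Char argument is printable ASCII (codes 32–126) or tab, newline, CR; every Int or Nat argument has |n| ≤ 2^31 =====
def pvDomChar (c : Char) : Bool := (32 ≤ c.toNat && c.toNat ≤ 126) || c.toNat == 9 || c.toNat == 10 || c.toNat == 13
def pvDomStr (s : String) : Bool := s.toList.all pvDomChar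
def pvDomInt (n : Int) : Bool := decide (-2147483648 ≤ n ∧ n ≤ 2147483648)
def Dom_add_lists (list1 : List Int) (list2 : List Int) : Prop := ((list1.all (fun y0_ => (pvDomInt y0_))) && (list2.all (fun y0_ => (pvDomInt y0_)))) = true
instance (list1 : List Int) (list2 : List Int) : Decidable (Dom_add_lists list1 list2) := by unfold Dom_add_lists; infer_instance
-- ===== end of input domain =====

-- B replaces A's overlap-sum-then-append-tail two-phase loop with one uniform pass over
-- range(max(len1,len2)) that zero-pads the shorter list (valid since 0 is the additive
-- identity on Int); same cost, different algorithmic formulation.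
-- ===== PORT A =====
def add_lists (list1 : List Int) (list2 : List Int) : List Int :=
  let min_len : Int := min (list1.length : Int) (list2.length : Int)
  let new_list : List Int :=
    (PySem.List.pyRange 0 min_len 1).foldl
      (fun acc i => acc ++ [PySem.List.pyGetD list1 i 0 + PySem.List.pyGetD list2 i 0]) []
  -- list1[i]/list2[i] via pyGetD: i ranges over 0..min_len-1, always in range, so exact
  if list1.length > list2.length then
    new_list ++ PySem.List.slice list1 (some min_len) none
  else
    new_list ++ PySem.List.slice list2 (some min_len) none

-- ===== PORT B =====
def add_lists_alt (list1 : List Int) (list2 : List Int) : List Int :=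
  -- the comprehension: i in range(max(len1,len2)); each conditional expression is exact
  -- (pyGetD is applied only when 0 ≤ i < length)
  (PySem.List.pyRange 0 (max (list1.length : Int) (list2.length : Int)) 1).map
    (fun i =>
      (if i < (list1.length : Int) then PySem.List.pyGetD list1 i 0 else 0)
      + (if i < (list2.length : Int) then PySem.List.pyGetD list2 i 0 else 0))

-- ===== PRECONDITION & SPEC =====
def Spec_add_lists (list1 : List Int) (list2 : List Int) (out : List Int) : Prop := out = add_lists_alt list1 list2
instance (list1 : List Int) (list2 : List Int) (out : List Int) : Decidable (Spec_add_lists list1 list2 out) := by unfold Spec_add_lists; infer_instance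

-- ===== CLAIM (what is proved, stated in full; the proofs are below) =====
def Claim_equal_add_lists : Prop := ∀ (list1 : List Int) (list2 : List Int), Dom_add_lists list1 list2 → Spec_add_lists list1 list2 (add_lists list1 list2)

-- ===== LEMMAS AND PROOFS =====
theorem add_lists_eq (list1 list2 : List Int) :
    add_lists list1 list2 = add_lists_alt list1 list2 := by
  have hmin : min (list1.length : Int) (list2.length : Int)
      = ((min list1.length list2.length : Nat) : Int) := by push_cast; ring_nf
  have hmax : max (list1.length : Int) (list2.length : Int)
      = ((max list1.length list2.length : Nat) : Int) := by push_cast; ring_nf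
  set m : Nat := min list1.length list2.length with hm
  set n : Nat := max list1.length list2.length with hn
  simp only [add_lists, add_lists_alt, hmin, hmax, PySem.List.pyRange_zero_natCast,
    PySem.List.foldl_append_singleton_eq_map, List.foldl_map,
    PySem.List.slice_from_natCast, List.nil_append, List.map_map]
  split_ifs with h12 <;>
  · apply List.ext_getElem
    · simp only [List.length_append, List.length_map, List.length_range, List.length_drop]
      omega
    · intro k hk1 hk2
      simp only [List.length_map, List.length_range] at hk2
      simp only [List.getElem_map, List.getElem_range, Function.comp_apply]
      by_cases hkm : k < m
      · rw [List.getElem_append_left (by simpa using hkm)]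
        simp only [List.getElem_map, List.getElem_range, PySem.List.pyGetD_natCast]
        rw [if_pos (by exact_mod_cast (by omega : k < list1.length)),
            if_pos (by exact_mod_cast (by omega : k < list2.length))]
      · rw [List.getElem_append_right (by simp only [List.length_map, List.length_range]; omega)]
        simp only [List.length_map, List.length_range, List.getElem_drop]
        first
        | · rw [if_pos (by exact_mod_cast (by omega : k < list1.length)),
              if_neg (by exact_mod_cast (by omega : ¬ (k:Int) < (list2.length:Int)))]
            have hme : m + (k - m) = k := by omega
            simp [hme, PySem.List.pyGetD_natCast, List.getD_eq_getElem?_getD,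
              List.getElem?_eq_getElem (by omega : k < list1.length)]
        | · rw [if_neg (by exact_mod_cast (by omega : ¬ (k:Int) < (list1.length:Int))),
              if_pos (by exact_mod_cast (by omega : k < list2.length))]
            have hme : m + (k - m) = k := by omega
            simp [hme, PySem.List.pyGetD_natCast, List.getD_eq_getElem?_getD,
              List.getElem?_eq_getElem (by omega : k < list2.length)]

-- ===== VERDICT (by name: the statement is the Claim_ definition above) =====
theorem add_lists_spec : Claim_equal_add_lists := by
  intro list1 list2 _
  unfold Spec_add_lists
  exact add_lists_eq list1 list2
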